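-- pv_equiv track=rewrite | github.com/egementunca/identity-factory-api | identity_factory/irreducible_generator.py | _compute_permutation
-- ===== SOURCE A (Python) =====
-- from typing import List, Optional, Tuple
--
-- def _compute_permutation(
--     gates: List[Tuple[int, int, int]], width: int
-- ) -> List[int]:
--     """
--     Compute the permutation implemented by a sequence of ECA57 gates.
--
--     ECA57 gate: target ^= (ctrl1 OR NOT ctrl2)
--
--     Args:
--         gates: List of gates [(c1, c2, target), ...]
--         width: Number of qubits
--
--     Returns:
--         Permutation as list [output_0, output_1, ..., output_n-1]
--     """
--     n = 2**width
--     perm = list(range(n))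
--
--     for c1, c2, target in gates:
--         new_perm = perm.copy()
--         for i in range(n):
--             # Get bit values
--             b_c1 = (i >> c1) & 1
--             b_c2 = (i >> c2) & 1
--             b_target = (i >> target) & 1
--
--             # ECA57 control: c1 OR (NOT c2)
--             control = b_c1 | (1 - b_c2)
--
--             if control:
--                 # Flip target bit
--                 flipped = i ^ (1 << target)
--                 new_perm[i] = perm[flipped]
--
--         perm = new_perm
--
--     return perm
-- ===== SOURCE B (Python) =====
-- from typing import List, Tuple
--
-- def _compute_permutation(
--     gates: List[Tuple[int, int, int]], width: int
-- ) -> List[int]: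
--     # Trace each state through the gates in reverse order (one pass per state,
--     # no per-gate copies of the permutation list).
--     result = []
--     for i in range(2 ** width):
--         x = i
--         for c1, c2, target in reversed(gates):
--             if ((x >> c1) & 1) | (1 - ((x >> c2) & 1)):
--                 x ^= 1 << target
--         result.append(x)
--     return result
-- ===== Notes on version B (the rewrite author's own statement) =====
-- stated objective: alternative
-- what changed: Instead of rebuilding the whole permutation list once per gate (a copy plus a full scan for each gate), B traces each state individually through the gate sequence in reverse order, one outer pass over states with no intermediate lists.
import Mathlib
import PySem

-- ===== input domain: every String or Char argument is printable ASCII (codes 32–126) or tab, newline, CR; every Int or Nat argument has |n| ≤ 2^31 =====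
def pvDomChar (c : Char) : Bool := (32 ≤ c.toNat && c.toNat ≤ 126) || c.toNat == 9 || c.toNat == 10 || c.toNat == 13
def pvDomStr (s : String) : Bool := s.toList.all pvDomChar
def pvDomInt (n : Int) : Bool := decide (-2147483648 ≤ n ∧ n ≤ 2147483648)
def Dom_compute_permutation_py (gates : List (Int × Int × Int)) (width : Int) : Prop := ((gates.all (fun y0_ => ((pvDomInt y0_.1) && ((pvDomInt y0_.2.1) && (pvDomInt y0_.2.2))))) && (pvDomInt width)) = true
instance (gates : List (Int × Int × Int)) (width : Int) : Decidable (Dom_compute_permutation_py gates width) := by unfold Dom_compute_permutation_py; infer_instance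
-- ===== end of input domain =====

-- B traces each state through the gates in reverse order instead of rebuilding the whole
-- permutation list once per gate (alternative decomposition, same asymptotic cost).

-- ===== PORT A =====
-- one iteration of A's outer loop: new_perm = perm.copy(); selective in-place updates
-- (rendered as rebuilding the list index by index; the lookups are in bounds under Pre_,
-- out-of-bounds lookups — where Python raises IndexError — are excluded by Pre_)
def pvGateStepA (n : Nat) (perm : List Int) (g : Int × Int × Int) : List Int :=
  (List.range n).map (fun i =>
    let b_c1 := (i >>> g.1.toNat) &&& 1
    let b_c2 := (i >>> g.2.1.toNat) &&& 1
    let control := b_c1 ||| (1 - b_c2)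
    if control ≠ 0 then
      let flipped := i ^^^ (1 <<< g.2.2.toNat)
      perm.getD flipped 0
    else
      perm.getD i 0)

def compute_permutation_py (gates : List (Int × Int × Int)) (width : Int) : List Int :=
  let n := 2 ^ width.toNat
  let perm := (List.range n).map Int.ofNat
  gates.foldl (pvGateStepA n) perm

-- ===== PORT B =====
-- apply one gate to one state (control evaluated before the flip)
def pvApplyGateB (g : Int × Int × Int) (x : Nat) : Nat :=
  if ((x >>> g.1.toNat) &&& 1) ||| (1 - ((x >>> g.2.1.toNat) &&& 1)) ≠ 0 then
    x ^^^ (1 <<< g.2.2.toNat)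
  else x

-- the 'for … in reversed(gates)' loop is the right fold over gates
def compute_permutation_py_alt (gates : List (Int × Int × Int)) (width : Int) : List Int :=
  let n := 2 ^ width.toNat
  (List.range n).map (fun i => Int.ofNat (gates.foldr pvApplyGateB i))

-- ===== PRECONDITION & SPEC =====
-- Pre_ excludes exactly the inputs where Python A raises: negative width (TypeError on
-- range), negative shift counts (ValueError), and a gate target ≥ width (IndexError at i=0).
def Pre_compute_permutation_py (gates : List (Int × Int × Int)) (width : Int) : Prop :=
  0 ≤ width ∧ ∀ g ∈ gates, 0 ≤ g.1 ∧ 0 ≤ g.2.1 ∧ 0 ≤ g.2.2 ∧ g.2.2 < width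
instance (gates : List (Int × Int × Int)) (width : Int) : Decidable (Pre_compute_permutation_py gates width) := by unfold Pre_compute_permutation_py; infer_instance

def pvWitness_compute_permutation_py : (List (Int × Int × Int)) × Int := ([(0, 1, 0), (1, 0, 1)], 2)

def Spec_compute_permutation_py (gates : List (Int × Int × Int)) (width : Int) (out : List Int) : Prop := out = compute_permutation_py_alt gates width
instance (gates : List (Int × Int × Int)) (width : Int) (out : List Int) : Decidable (Spec_compute_permutation_py gates width out) := by unfold Spec_compute_permutation_py; infer_instance

-- ===== CLAIM (what is proved, stated in full; the proofs are below) =====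
def Claim_equal_compute_permutation_py : Prop := ∀ (gates : List (Int × Int × Int)) (width : Int), Dom_compute_permutation_py gates width → Pre_compute_permutation_py gates width → Spec_compute_permutation_py gates width (compute_permutation_py gates width)

-- ===== LEMMAS AND PROOFS =====

theorem pv_getD_map_range (h : Nat → Int) (n j : Nat) (hj : j < n) :
    ((List.range n).map h).getD j 0 = h j := by
  simp [List.getD_eq_getElem?_getD, hj]

theorem pv_step_map (w : Nat) (h : Nat → Int) (g : Int × Int × Int) (hg : g.2.2.toNat < w) :
    pvGateStepA (2 ^ w) ((List.range (2 ^ w)).map h) g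
      = (List.range (2 ^ w)).map (fun i => h (pvApplyGateB g i)) := by
  unfold pvGateStepA
  apply List.map_congr_left
  intro i hi
  have hi' : i < 2 ^ w := List.mem_range.mp hi
  simp only [pvApplyGateB]
  split
  · exact pv_getD_map_range h _ _ (Nat.xor_lt_two_pow hi' (by
      rw [Nat.one_shiftLeft]
      exact Nat.pow_lt_pow_right (by norm_num) hg))
  · exact pv_getD_map_range h _ _ hi'

theorem pv_foldl_steps (w : Nat) :
    ∀ (gs : List (Int × Int × Int)) (h : Nat → Int),
      (∀ g ∈ gs, g.2.2.toNat < w) →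
      List.foldl (pvGateStepA (2 ^ w)) ((List.range (2 ^ w)).map h) gs
        = (List.range (2 ^ w)).map (fun i => h (List.foldr pvApplyGateB i gs)) := by
  intro gs
  induction gs with
  | nil => intro h _; simp
  | cons g gs' ih =>
    intro h hb
    rw [List.foldl_cons, pv_step_map w h g (hb g (List.mem_cons_self ..)),
        ih (fun i => h (pvApplyGateB g i)) (fun g' hg' => hb g' (List.mem_cons_of_mem _ hg'))]
    rfl

-- ===== VERDICT (by name: the statement is the Claim_ definition above) =====
theorem compute_permutation_py_spec : Claim_equal_compute_permutation_py := by
  intro gates width _ hpre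
  unfold Spec_compute_permutation_py compute_permutation_py compute_permutation_py_alt
  exact pv_foldl_steps width.toNat gates Int.ofNat
    (fun g hg => by
      have h := hpre.2 g hg
      omega)
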